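-- pv_equiv track=rewrite | github.com/florenciaaltschuler/Introduccion-a-la-computacion | icb-master/Taller0/Taller0.py | jugarMiedo
-- ===== SOURCE A (Python) =====
-- def jugarMiedo(m):
-- #ahora el jugador va a dejar de jugar cuando su suma sea mayor a 19 (siempre que el mazo
-- #no esté vacío)
--     suma=0
--     while suma <= 19:
--         if len(m)!=0:
--             suma=suma+m.pop(0)
--         else:
--             return suma
--     return suma
-- ===== SOURCE B (Python) =====
-- def jugarMiedo(m):
--     # Build the table of running prefix sums, stopping right after the first
--     # entry that exceeds 19; the answer is the table's last entry (0 if empty),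
--     # and one slice-delete of the consumed prefix reproduces A's mutation of m.
--     sums = []
--     t = 0
--     for x in m:
--         t += x
--         sums.append(t)
--         if t > 19:
--             break
--     del m[:len(sums)]
--     return sums[-1] if sums else 0
-- ===== Notes on version B (the rewrite author's own statement) =====
-- stated objective: faster
-- what changed: Replaces the while-loop of repeated m.pop(0) (each O(n)) by building a prefix-sum table truncated at the first entry exceeding 19 and returning its last entry, with one slice-delete for the mutation.
import Mathlib
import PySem

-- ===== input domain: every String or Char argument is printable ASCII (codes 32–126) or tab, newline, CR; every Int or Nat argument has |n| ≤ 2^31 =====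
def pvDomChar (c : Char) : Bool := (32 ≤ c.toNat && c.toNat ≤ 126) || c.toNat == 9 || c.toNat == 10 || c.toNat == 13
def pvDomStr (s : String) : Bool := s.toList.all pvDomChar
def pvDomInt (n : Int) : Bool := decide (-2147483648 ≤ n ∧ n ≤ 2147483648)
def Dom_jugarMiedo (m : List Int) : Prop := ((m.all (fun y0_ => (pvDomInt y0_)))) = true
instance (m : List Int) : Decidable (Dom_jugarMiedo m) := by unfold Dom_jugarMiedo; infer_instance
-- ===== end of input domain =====

-- B replaces A's repeated pop(0) while-loop by a prefix-sum table plus a search for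
-- the first entry exceeding 19 (faster in a timing run); both mutate m by
-- removing the same consumed prefix, and the theorem is about the RETURN value.


-- ===== PORT A =====
-- while suma <= 19: pop the head and add it, or return suma if the deck is empty
def jugarMiedoLoop (suma : Int) (m : List Int) : Int :=
  if suma ≤ 19 then
    match m with
    | [] => suma
    | x :: xs => jugarMiedoLoop (suma + x) xs
  else suma

def jugarMiedo (m : List Int) : Int := jugarMiedoLoop 0 m

-- ===== PORT B =====
-- the prefix-sum table, truncated right after the first entry exceeding 19
def jugarMiedoSums (t : Int) : List Int → List Int
  | [] => []
  | x :: xs => if t + x > 19 then [t + x] else (t + x) :: jugarMiedoSums (t + x) xs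

-- the answer is the table's last entry (0 if the table is empty)
def jugarMiedo_alt (m : List Int) : Int :=
  ((jugarMiedoSums 0 m).getLast?).getD 0

-- ===== PRECONDITION & SPEC =====
def Spec_jugarMiedo (m : List Int) (out : Int) : Prop := out = jugarMiedo_alt m
instance (m : List Int) (out : Int) : Decidable (Spec_jugarMiedo m out) := by unfold Spec_jugarMiedo; infer_instance

-- ===== CLAIM (what is proved, stated in full; the proofs are below) =====
def Claim_equal_jugarMiedo : Prop := ∀ (m : List Int), Dom_jugarMiedo m → Spec_jugarMiedo m (jugarMiedo m)

-- ===== LEMMAS AND PROOFS =====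
theorem jugarMiedoGetLast (a d : Int) (l : List Int) :
    ((a :: l).getLast?).getD d = (l.getLast?).getD a := by
  induction l generalizing a d with
  | nil => simp
  | cons b t ih => rw [List.getLast?_cons_cons, ih b d, ih b a]

theorem jugarMiedoLoop_eq (m : List Int) :
    ∀ s : Int, s ≤ 19 →
      jugarMiedoLoop s m = ((jugarMiedoSums s m).getLast?).getD s := by
  induction m with
  | nil => intro s hs; simp [jugarMiedoLoop, jugarMiedoSums, hs]
  | cons x xs ih =>
    intro s hs
    rw [jugarMiedoLoop.eq_def]
    simp only [if_pos hs]
    by_cases h : s + x > 19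
    · rw [jugarMiedoLoop.eq_def, if_neg (by omega : ¬ s + x ≤ 19)]
      simp [jugarMiedoSums, h]
    · rw [ih (s + x) (by omega)]
      simp [jugarMiedoSums, h, jugarMiedoGetLast]

-- ===== VERDICT (by name: the statement is the Claim_ definition above) =====
theorem jugarMiedo_spec : Claim_equal_jugarMiedo := by
  intro m _
  unfold Spec_jugarMiedo jugarMiedo jugarMiedo_alt
  exact jugarMiedoLoop_eq m 0 (by norm_num)
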